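-- pv_equiv track=rewrite | github.com/ha5804/RNN_LSTM | data_process.py | count_warning_sequences
-- ===== SOURCE A (Python) =====
-- def count_warning_sequences(labels, seq_len = 10):
--     count = 0
--     waring_index = []
--     for i in range(len(labels) - seq_len):
--         window = labels[i: i+seq_len]
--         if any(l == 1 for l in window):
--             count += 1
--             waring_index.append(i)
--     return count, waring_index
-- ===== SOURCE B (Python) =====
-- def count_warning_sequences(labels, seq_len = 10):
--     n = len(labels)
--     if seq_len <= 0:
--         return 0, []
--     prefix = [0]
--     for l in labels:
--         prefix.append(prefix[-1] + (1 if l == 1 else 0))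
--     waring_index = [i for i in range(n - seq_len)
--                     if prefix[i] < prefix[i + seq_len]]
--     return len(waring_index), waring_index
-- ===== Notes on version B (the rewrite author's own statement) =====
-- stated objective: faster
-- what changed: B replaces A's per-index slice-and-scan (any() over each length-seq_len window) with a single prefix-sum pass over labels, deciding each window by comparing two prefix counts, and rejects non-positive window lengths up front.
-- intended difference: For seq_len < 0 with len(labels)+seq_len > 0 and a 1 among labels[:-1], A's slice stop i+seq_len wraps around to the end of the list, so A counts accidental length-(n+seq_len) windows and returns a positive count; B returns (0, []) because a window of negative length contains nothing, which is the intended reading. — e.g. on count_warning_sequences([1, 0], -1): A returns (1, [0]), B returns (0, [])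
import Mathlib
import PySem

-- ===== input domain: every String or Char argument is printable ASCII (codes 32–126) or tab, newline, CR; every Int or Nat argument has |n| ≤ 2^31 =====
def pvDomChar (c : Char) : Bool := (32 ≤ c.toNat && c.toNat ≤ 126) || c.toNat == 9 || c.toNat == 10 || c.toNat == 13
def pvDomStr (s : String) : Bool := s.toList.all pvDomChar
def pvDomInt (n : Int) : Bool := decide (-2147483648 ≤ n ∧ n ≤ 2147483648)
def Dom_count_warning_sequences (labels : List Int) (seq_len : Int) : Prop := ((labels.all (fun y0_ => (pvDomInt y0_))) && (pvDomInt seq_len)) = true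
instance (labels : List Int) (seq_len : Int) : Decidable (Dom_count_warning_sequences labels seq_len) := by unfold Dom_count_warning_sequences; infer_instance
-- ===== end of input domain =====

-- B counts warning windows with a single prefix-sum pass instead of A's per-index
-- slice-and-scan; for seq_len < 0 B returns (0, []) where A's wrapped slice stop yields
-- accidental windows (stated as the intended difference D_ below).


-- ===== PORT A =====
def count_warning_sequences (labels : List Int) (seq_len : Int) : Int × List Int :=
  (PySem.List.pyRange 0 ((labels.length : Int) - seq_len) 1).foldl
    (fun st i =>
      let window := PySem.List.slice labels (some i) (some (i + seq_len))
      if window.any (fun l => l == 1) then (st.1 + 1, st.2 ++ [i]) else st)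
    ((0 : Int), ([] : List Int))

-- ===== PORT B =====
def count_warning_sequences_alt (labels : List Int) (seq_len : Int) : Int × List Int :=
  let n : Int := labels.length
  if seq_len ≤ 0 then (0, [])
  else
    let pre := labels.foldl
      (fun pre l => pre ++ [PySem.List.pyGetD pre (-1) 0 + (if l == 1 then (1 : Int) else 0)])
      [(0 : Int)]
    -- pre (the prefix-count list) is only indexed with 0 ≤ i ≤ len(labels): always in range
    let idx := (PySem.List.pyRange 0 (n - seq_len) 1).filter
      (fun i => decide (PySem.List.pyGetD pre i 0 < PySem.List.pyGetD pre (i + seq_len) 0))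
    ((idx.length : Int), idx)

-- ===== PRECONDITION & SPEC =====
-- For seq_len < 0 with len(labels)+seq_len > 0 and a 1 among labels[:-1], A's slice stop
-- i+seq_len wraps around (Python negative indexing), so A counts accidental windows and
-- returns a positive count; B returns (0, []) because a window of non-positive length
-- contains nothing, which is the intended reading.
def D_count_warning_sequences (labels : List Int) (seq_len : Int) : Prop :=
  seq_len < 0 ∧ 0 < (labels.length : Int) + seq_len ∧ (1 : Int) ∈ labels.take (labels.length - 1)
instance (labels : List Int) (seq_len : Int) : Decidable (D_count_warning_sequences labels seq_len) := by unfold D_count_warning_sequences; infer_instance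
def Spec_count_warning_sequences (labels : List Int) (seq_len : Int) (out : Int × List Int) : Prop := ¬ D_count_warning_sequences labels seq_len → out = count_warning_sequences_alt labels seq_len
instance (labels : List Int) (seq_len : Int) (out : Int × List Int) : Decidable (Spec_count_warning_sequences labels seq_len out) := by unfold Spec_count_warning_sequences; infer_instance
def pvDiffWitness_count_warning_sequences : List Int × Int := ([1, 0], -1)
def pvDiffWitnessOut_count_warning_sequences : (Int × List Int) × (Int × List Int) := ((1, [0]), (0, []))

-- ===== CLAIM (what is proved, stated in full; the proofs are below) =====
def Claim_unchanged_count_warning_sequences : Prop := ∀ (labels : List Int) (seq_len : Int), Dom_count_warning_sequences labels seq_len → Spec_count_warning_sequences labels seq_len (count_warning_sequences labels seq_len)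
def Claim_changed_count_warning_sequences : Prop := Dom_count_warning_sequences (pvDiffWitness_count_warning_sequences.1) (pvDiffWitness_count_warning_sequences.2) ∧ D_count_warning_sequences (pvDiffWitness_count_warning_sequences.1) (pvDiffWitness_count_warning_sequences.2) ∧ count_warning_sequences (pvDiffWitness_count_warning_sequences.1) (pvDiffWitness_count_warning_sequences.2) = pvDiffWitnessOut_count_warning_sequences.1 ∧ count_warning_sequences_alt (pvDiffWitness_count_warning_sequences.1) (pvDiffWitness_count_warning_sequences.2) = pvDiffWitnessOut_count_warning_sequences.2 ∧ pvDiffWitnessOut_count_warning_sequences.1 ≠ pvDiffWitnessOut_count_warning_sequences.2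
def Claim_exact_count_warning_sequences : Prop := ∀ (labels : List Int) (seq_len : Int), Dom_count_warning_sequences labels seq_len → D_count_warning_sequences labels seq_len → count_warning_sequences labels seq_len ≠ count_warning_sequences_alt labels seq_len

-- ===== LEMMAS AND PROOFS =====

theorem cwsClamp (n : Nat) (x : Int) :
    PySem.List.clampIdx n x = if 0 ≤ x then min x.toNat n else n - (-x).toNat := by
  by_cases h : 0 ≤ x
  · rw [if_pos h]
    have hx : x = ((x.toNat : Nat) : Int) := by omega
    rw [hx, PySem.List.clampIdx_natCast]
    omega
  · rw [if_neg h]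
    have hx : x = -(((-x).toNat : Nat) : Int) := by omega
    rw [hx, PySem.List.clampIdx_neg_natCast] <;> omega

theorem cwsSlice (xs : List Int) (a b : Int) :
    PySem.List.slice xs (some a) (some b) =
      (xs.take (PySem.List.clampIdx xs.length b)).drop (PySem.List.clampIdx xs.length a) := by
  simp [PySem.List.slice, List.drop_take]

theorem cwsFoldlId {α β : Type} (l : List β) (init : α) :
    l.foldl (fun st _ => st) init = init := by
  induction l generalizing init with
  | nil => rfl
  | cons x xs ih => simpa using ih init

-- In the degenerate cases (seq_len ≤ 0 outside D_) every window A scans misses 1.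
theorem cwsNoOne (labels : List Int) (s i : Int) (h0 : 0 ≤ i) (hs : s ≤ 0)
    (hD : ¬ D_count_warning_sequences labels s) :
    (PySem.List.slice labels (some i) (some (i + s))).any (fun l => l == 1) = false := by
  rw [cwsSlice, List.any_eq_false]
  intro x hx
  have hx2 : x ∈ labels.take (PySem.List.clampIdx labels.length (i + s)) := List.mem_of_mem_drop hx
  by_cases hib : 0 ≤ i + s
  · exfalso
    have hempty : (labels.take (PySem.List.clampIdx labels.length (i + s))).drop
        (PySem.List.clampIdx labels.length i) = [] := by
      apply List.drop_eq_nil_of_le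
      rw [List.length_take, cwsClamp, cwsClamp]
      split_ifs <;> omega
    rw [hempty] at hx
    simp at hx
  · unfold D_count_warning_sequences at hD
    push_neg at hD
    have hslt : s < 0 := by omega
    by_cases hn : 0 < (labels.length : Int) + s
    · have hnot : (1 : Int) ∉ labels.take (labels.length - 1) := hD hslt hn
      have hc2 : PySem.List.clampIdx labels.length (i + s) ≤ labels.length - 1 := by
        rw [cwsClamp]; split_ifs <;> omega
      have : x ∈ labels.take (labels.length - 1) := by
        have heq : labels.take (PySem.List.clampIdx labels.length (i + s)) =
            (labels.take (labels.length - 1)).take (PySem.List.clampIdx labels.length (i + s)) := by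
          rw [List.take_take]; congr 1; omega
        rw [heq] at hx2
        exact List.mem_of_mem_take hx2
      simp only [beq_iff_eq]
      intro hx1
      exact hnot (hx1 ▸ this)
    · exfalso
      have hempty : (labels.take (PySem.List.clampIdx labels.length (i + s))).drop
          (PySem.List.clampIdx labels.length i) = [] := by
        apply List.drop_eq_nil_of_le
        rw [List.length_take, cwsClamp, cwsClamp]
        split_ifs <;> omega
      rw [hempty] at hx
      simp at hx

theorem cwsFoldCount (p : Int → Bool) (l : List Int) (c : Int) (acc : List Int) :
    l.foldl (fun st i => if p i then (st.1 + 1, st.2 ++ [i]) else st) (c, acc)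
      = (c + ((l.filter p).length : Int), acc ++ l.filter p) := by
  induction l generalizing c acc with
  | nil => simp
  | cons x xs ih =>
    by_cases h : p x
    · simp only [List.foldl_cons, h, if_pos, List.filter_cons_of_pos h, ih]
      rw [Prod.mk.injEq]
      refine ⟨by push_cast [List.length_cons]; ring, by simp⟩
    · simp [List.foldl_cons, h, List.filter_cons_of_neg h, ih]

theorem cwsPrefix (labels : List Int) :
    labels.foldl
      (fun pre l => pre ++ [PySem.List.pyGetD pre (-1) 0 + (if l == 1 then (1 : Int) else 0)])
      [(0 : Int)]
    = (List.range (labels.length + 1)).map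
        (fun k => (((labels.take k).countP (fun l => l == 1) : Nat) : Int)) := by
  induction labels using List.reverseRecOn with
  | nil => simp
  | append_singleton ys y ih =>
    rw [List.foldl_append, ih]
    simp only [List.foldl_cons, List.foldl_nil, List.length_append, List.length_singleton]
    conv_rhs => rw [show ys.length + 1 + 1 = (ys.length + 1) + 1 from rfl, List.range_succ,
      List.map_append]
    congr 1
    · apply List.map_congr_left
      intro k hk
      have hk' : k ≤ ys.length := by
        have := List.mem_range.mp hk; omega
      rw [List.take_append_of_le_length hk']
    · conv_lhs => rw [List.range_succ, List.map_append]
      simp only [List.map_cons, List.map_nil]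
      rw [PySem.List.pyGetD_neg_one_append_singleton]
      congr 1
      rw [List.take_length]
      have htake : (ys ++ [y]).take (ys.length + 1) = ys ++ [y] := by
        apply List.take_of_length_le; simp
      rw [htake, List.countP_append]
      by_cases hy : y == 1 <;> simp [hy]

theorem cwsGet (labels : List Int) (j : Int) (h0 : 0 ≤ j) (hj : j ≤ (labels.length : Int)) :
    PySem.List.pyGetD ((List.range (labels.length + 1)).map
      (fun k => (((labels.take k).countP (fun l => l == 1) : Nat) : Int))) j 0
    = (((labels.take j.toNat).countP (fun l => l == 1) : Nat) : Int) := by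
  have hb : j < (((List.range (labels.length + 1)).map
      (fun k => (((labels.take k).countP (fun l => l == 1) : Nat) : Int))).length : Int) := by
    simp; omega
  rw [PySem.List.pyGetD_eq_getElem _ _ h0 hb]
  simp

theorem cwsCond (labels : List Int) (s i : Int) (hs : 0 < s) (h0 : 0 ≤ i)
    (hi : i < (labels.length : Int) - s) :
    (PySem.List.slice labels (some i) (some (i + s))).any (fun l => l == 1)
    = decide ((((labels.take i.toNat).countP (fun l => l == 1) : Nat) : Int)
        < (((labels.take (i + s).toNat).countP (fun l => l == 1) : Nat) : Int)) := by
  have hsplit : labels.take (i + s).toNat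
      = labels.take i.toNat ++ (labels.drop i.toNat).take s.toNat := by
    rw [← List.take_add]
    congr 1
    omega
  have hb : 0 ≤ i + s := by omega
  rw [PySem.List.slice_toNat _ h0 hb]
  have harg : (i + s).toNat - i.toNat = s.toNat := by omega
  rw [harg, hsplit, List.countP_append]
  rw [Bool.eq_iff_iff, decide_eq_true_iff, List.any_eq_true, ← List.countP_pos_iff]
  omega

theorem cws_main (labels : List Int) (s : Int) (hD : ¬ D_count_warning_sequences labels s) :
    count_warning_sequences labels s = count_warning_sequences_alt labels s := by
  unfold count_warning_sequences count_warning_sequences_alt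
  by_cases hs : s ≤ 0
  · rw [if_pos hs]
    have h : ∀ (acc : Int × List Int), ∀ x ∈ PySem.List.pyRange 0 ((labels.length : Int) - s) 1,
        (fun (st : Int × List Int) i =>
          let window := PySem.List.slice labels (some i) (some (i + s))
          if window.any (fun l => l == 1) then (st.1 + 1, st.2 ++ [i]) else st) acc x
        = (fun (st : Int × List Int) (_ : Int) => st) acc x := by
      intro acc x hx
      have hx0 : 0 ≤ x := (PySem.List.mem_pyRange_one.mp hx).1
      simp [cwsNoOne labels s x hx0 hs hD]
    rw [PySem.List.foldl_congr_mem _ _ _ _ h]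
    exact cwsFoldlId _ _
  · rw [if_neg hs]
    push_neg at hs
    rw [cwsPrefix]
    have h : ∀ (acc : Int × List Int), ∀ i ∈ PySem.List.pyRange 0 ((labels.length : Int) - s) 1,
        (fun (st : Int × List Int) i =>
          let window := PySem.List.slice labels (some i) (some (i + s))
          if window.any (fun l => l == 1) then (st.1 + 1, st.2 ++ [i]) else st) acc i
        = (fun (st : Int × List Int) (i : Int) =>
            if decide (PySem.List.pyGetD ((List.range (labels.length + 1)).map
                (fun k => (((labels.take k).countP (fun l => l == 1) : Nat) : Int))) i 0
              < PySem.List.pyGetD ((List.range (labels.length + 1)).map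
                (fun k => (((labels.take k).countP (fun l => l == 1) : Nat) : Int))) (i + s) 0)
            then (st.1 + 1, st.2 ++ [i]) else st) acc i := by
      intro acc i hi
      obtain ⟨h0, hlt⟩ := PySem.List.mem_pyRange_one.mp hi
      simp only []
      rw [cwsCond labels s i hs h0 hlt,
        cwsGet labels i h0 (by omega), cwsGet labels (i + s) (by omega) (by omega)]
    rw [PySem.List.foldl_congr_mem _ _ _ _ h, cwsFoldCount]
    simp

theorem cws_tight (labels : List Int) (s : Int) (hD : D_count_warning_sequences labels s) :
    count_warning_sequences labels s ≠ count_warning_sequences_alt labels s := by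
  obtain ⟨hs, hn, hmem⟩ := hD
  have hB : count_warning_sequences_alt labels s = (0, []) := by
    unfold count_warning_sequences_alt
    rw [if_pos (le_of_lt hs)]
  obtain ⟨k, hk, hk1⟩ := List.getElem_of_mem hmem
  have hklen : k < labels.length - 1 := by
    have := hk
    rw [List.length_take] at this
    omega
  have hkval : labels[k]'(by omega) = 1 := by
    rw [List.getElem_take] at hk1
    exact hk1
  -- the witness index whose (wrapped) window contains position k
  have hi0 : ∃ i0 : Int, 0 ≤ i0 ∧ i0 < (labels.length : Int) - s ∧ i0 + s < 0 ∧
      i0 ≤ (k : Int) ∧ (k : Int) < (labels.length : Int) + i0 + s :=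
    ⟨max 0 ((k : Int) - ((labels.length : Int) + s) + 1), by omega, by omega, by omega, by omega, by omega⟩
  obtain ⟨i0, h0, hi0lt, his, hik, hkc⟩ := hi0
  have hc1 : PySem.List.clampIdx labels.length i0 = i0.toNat := by
    rw [cwsClamp]; split_ifs <;> omega
  have hc2 : PySem.List.clampIdx labels.length (i0 + s) = labels.length - (-(i0 + s)).toNat := by
    rw [cwsClamp]; split_ifs <;> omega
  have hq : (PySem.List.slice labels (some i0) (some (i0 + s))).any (fun l => l == 1) = true := by
    rw [cwsSlice, hc1, hc2, List.any_eq_true]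
    refine ⟨1, ?_, by simp⟩
    have hlen : k - i0.toNat <
        ((labels.take (labels.length - (-(i0 + s)).toNat)).drop i0.toNat).length := by
      rw [List.length_drop, List.length_take]
      omega
    have hval : ((labels.take (labels.length - (-(i0 + s)).toNat)).drop i0.toNat)[k - i0.toNat]'hlen
        = 1 := by
      rw [List.getElem_drop, List.getElem_take]
      have hidx : i0.toNat + (k - i0.toNat) = k := by omega
      simp only [hidx]
      exact hkval
    exact hval ▸ List.getElem_mem hlen
  have hmemf : i0 ∈ (PySem.List.pyRange 0 ((labels.length : Int) - s) 1).filter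
      (fun i => (PySem.List.slice labels (some i) (some (i + s))).any (fun l => l == 1)) :=
    List.mem_filter.mpr ⟨PySem.List.mem_pyRange_one.mpr ⟨h0, hi0lt⟩, hq⟩
  rw [hB]
  unfold count_warning_sequences
  show (PySem.List.pyRange 0 ((labels.length : Int) - s) 1).foldl
      (fun st i => if (PySem.List.slice labels (some i) (some (i + s))).any (fun l => l == 1)
        then (st.1 + 1, st.2 ++ [i]) else st) ((0 : Int), ([] : List Int)) ≠ (0, [])
  rw [cwsFoldCount]
  intro heq
  have h2 := congrArg Prod.snd heq
  simp only [List.nil_append] at h2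
  rw [h2] at hmemf
  simp at hmemf

-- ===== VERDICT (by name: the statement is the Claim_ definition above) =====
theorem count_warning_sequences_spec : Claim_unchanged_count_warning_sequences := by
  intro labels seq_len _ hD
  exact cws_main labels seq_len hD

theorem count_warning_sequences_changed : Claim_changed_count_warning_sequences := by
  unfold Claim_changed_count_warning_sequences; decide

theorem count_warning_sequences_tight : Claim_exact_count_warning_sequences := by
  intro labels seq_len _ hD
  exact cws_tight labels seq_len hD
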